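-- pv_equiv track=rewrite | github.com/c-not-around/iron-calc | bin/calc.py | parse
-- ===== SOURCE A (Python) =====
-- prefixes =['Y','Z','E','P','T','G','M','k','m','u','n','p','f','a','z','y','J']
--
-- def fnd(x,f):
--     for i in range(1,len(x)):
--         if (x[i] == f) and (x[i-1].isdigit()):
--             return i
--     return None
--
-- def strt(x,n):
--     for i in range(n-1,0,-1):
--         if not (x[i] in ['.','0','1','2','3','4','5','6','7','8','9']):
--             return i+1
--     return 0
--
-- def parse(x):
--     for p in prefixes:
--         pos = fnd(x,p)
--         while pos != None:
--             st = strt(x,pos)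
--             x = x[:st]+'('+x[st:pos]+'*'+x[pos]+')'+x[pos+1:]
--             pos = fnd(x,p)
--     return x
-- ===== SOURCE B (Python) =====
-- prefixes =['Y','Z','E','P','T','G','M','k','m','u','n','p','f','a','z','y','J']
--
-- def parse(x):
--     prefix_set = frozenset(prefixes)
--     runset = frozenset('.0123456789')
--     out = []
--     run = []                      # pending digit/dot run
--     for c in x:
--         if run and c in prefix_set and run[-1].isdigit():
--             out.append('(' + ''.join(run) + '*' + c + ')')
--             run = []
--         elif c in runset:
--             run.append(c)
--         else:
--             out.append(''.join(run))
--             out.append(c)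
--             run = []
--     out.append(''.join(run))
--     return ''.join(out)
-- ===== Notes on version B (the rewrite author's own statement) =====
-- stated objective: faster
-- what changed: A repeatedly rescans the whole string from the start and rebuilds it after every single insertion (per each of 17 prefixes); B makes one left-to-right pass tracking the pending digit/dot run and emits each wrapped factor directly.
-- intended difference: On strings whose first character is not a digit/dot and not '(' and is immediately followed by a digit/dot run ending in a digit and then an SI-prefix letter, A returns the first character swallowed inside the wrapped product (e.g. 'a1k' -> '(a1*k)') because strt never checks index 0, while B wraps only the numeric run ('a1k' -> 'a(1*k)'), which is the intended grouping. — e.g. on parse("a1k"): A returns "(a1*k)", B returns "a(1*k)"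
import Mathlib
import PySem

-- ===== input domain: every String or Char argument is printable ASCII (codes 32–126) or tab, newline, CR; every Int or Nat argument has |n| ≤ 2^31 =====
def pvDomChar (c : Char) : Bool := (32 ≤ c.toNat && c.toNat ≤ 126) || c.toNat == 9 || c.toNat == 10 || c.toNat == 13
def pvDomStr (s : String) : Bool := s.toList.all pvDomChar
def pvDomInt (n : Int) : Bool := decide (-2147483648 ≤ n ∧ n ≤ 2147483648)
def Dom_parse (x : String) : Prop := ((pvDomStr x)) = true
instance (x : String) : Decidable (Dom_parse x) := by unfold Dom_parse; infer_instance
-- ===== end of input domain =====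

-- B replaces A's rescan-and-rewrite fixpoint (a fresh O(n) scan and a full string rebuild after
-- every insertion, for each of 17 prefixes) with a single left-to-right pass; on strings whose
-- leading character A's strt silently drags into the wrapped number (strt never checks index 0),
-- B wraps only the numeric run — see D_parse.

-- ===== PORT A =====
def prefixChars : List Char := ['Y','Z','E','P','T','G','M','k','m','u','n','p','f','a','z','y','J']
def runChars : List Char := ['.','0','1','2','3','4','5','6','7','8','9']

-- fnd(x,f): scan i = 1 .. len-1, carrying the previous character; Char.isDigit is exact for
-- str.isdigit on the printable-ASCII domain.
def fndGo (f : Char) : Char → List Char → Nat → Option Nat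
  | _, [], _ => none
  | prev, c :: cs, i => if c = f ∧ prev.isDigit = true then some i else fndGo f c cs (i + 1)

def fnd (x : List Char) (f : Char) : Option Nat :=
  match x with
  | [] => none
  | c :: cs => fndGo f c cs 1

-- strt(x,n): loop i = n-1 downto 1; x[i] is in range at every call site, so getD is exact.
def strtGo (x : List Char) : Nat → Nat
  | 0 => 0
  | i + 1 => if x.getD (i + 1) ' ' ∈ runChars then strtGo x i else i + 2

def strt (x : List Char) (n : Nat) : Nat := strtGo x (n - 1)

-- x[:st] + '(' + x[st:pos] + '*' + x[pos] + ')' + x[pos+1:]  with 0 ≤ st ≤ pos < len by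
-- construction, so take/drop/getD are exact for the Python slices.
def rw1 (x : List Char) (st pos : Nat) : List Char :=
  x.take st ++ '(' :: ((x.take pos).drop st ++ '*' :: x.getD pos ' ' :: ')' :: x.drop (pos + 1))

-- the while loop: one iteration per (digit,p) adjacency; a rewrite removes one and never creates
-- one (proved in cnt_rewrite below), so fuel = length + 1 is never exhausted — a totality guard
-- only, not an algorithm change.
def whileA (p : Char) : Nat → List Char → List Char
  | 0, x => x
  | fuel + 1, x =>
    match fnd x p with
    | none => x
    | some pos => whileA p fuel (rw1 x (strt x pos) pos)

def parse (x : String) : String :=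
  String.ofList (prefixChars.foldl (fun s p => whileA p (s.length + 1) s) x.toList)

-- ===== PORT B =====
def isRunB (c : Char) : Bool := c ∈ runChars

-- one step of B's single pass: state = (emitted output, pending digit/dot run)
def altStep (s : List Char × List Char) (c : Char) : List Char × List Char :=
  if s.2 ≠ [] ∧ c ∈ prefixChars ∧ (s.2.getLast?.getD ' ').isDigit = true then
    (s.1 ++ '(' :: (s.2 ++ ['*', c, ')']), [])
  else if c ∈ runChars then
    (s.1, s.2 ++ [c])
  else
    (s.1 ++ (s.2 ++ [c]), [])

def parse_alt (x : String) : String :=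
  String.ofList ((x.toList.foldl altStep ([], [])).1 ++ (x.toList.foldl altStep ([], [])).2)

-- ===== PRECONDITION & SPEC =====
-- On strings whose first character is not a digit/dot and not '(' and is immediately followed by
-- a digit/dot run ending in a digit and then an SI-prefix letter, A returns the first character
-- swallowed inside the wrapped product ('a1k' -> '(a1*k)') because strt never checks index 0,
-- while B wraps only the numeric run ('a1k' -> 'a(1*k)'), which is the intended grouping.
def D_parse (x : String) : Prop :=
  x.toList ≠ [] ∧ x.toList.headD ' ' ∉ runChars ∧ x.toList.headD ' ' ≠ '(' ∧
  (x.toList.tail.takeWhile isRunB) ≠ [] ∧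
  (((x.toList.tail.takeWhile isRunB).getLast?.getD ' ').isDigit = true) ∧
  ((x.toList.tail.dropWhile isRunB).headD ' ') ∈ prefixChars
instance (x : String) : Decidable (D_parse x) := by unfold D_parse; infer_instance

def Spec_parse (x : String) (out : String) : Prop := ¬ D_parse x → out = parse_alt x
instance (x : String) (out : String) : Decidable (Spec_parse x out) := by unfold Spec_parse; infer_instance

def pvDiffWitness_parse : String := "a1k"
def pvDiffWitnessOut_parse : String × String := ("(a1*k)", "a(1*k)")

-- ===== CLAIM (what is proved, stated in full; the proofs are below) =====
def Claim_unchanged_parse : Prop := ∀ (x : String), Dom_parse x → Spec_parse x (parse x)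
def Claim_changed_parse : Prop := Dom_parse (pvDiffWitness_parse) ∧ D_parse (pvDiffWitness_parse) ∧ parse (pvDiffWitness_parse) = pvDiffWitnessOut_parse.1 ∧ parse_alt (pvDiffWitness_parse) = pvDiffWitnessOut_parse.2 ∧ pvDiffWitnessOut_parse.1 ≠ pvDiffWitnessOut_parse.2
def Claim_exact_parse : Prop := ∀ (x : String), Dom_parse x → D_parse x → parse x ≠ parse_alt x

-- ===== LEMMAS AND PROOFS =====

-- character-class facts
lemma run_not_pre : ∀ c ∈ runChars, c ∉ prefixChars := by
  intro c hc; fin_cases hc <;> decide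

lemma pre_not_run : ∀ c ∈ prefixChars, c ∉ runChars := by
  intro c hc; fin_cases hc <;> decide

lemma pre_not_digit : ∀ c ∈ prefixChars, c.isDigit = false := by
  intro c hc; fin_cases hc <;> decide

lemma digit_run : ∀ c : Char, c.isDigit = true → c ∈ runChars := by
  intro c h
  simp only [Char.isDigit, Bool.and_eq_true, decide_eq_true_eq] at h
  obtain ⟨h1, h2⟩ := h
  have l1 : (48 : Nat) ≤ c.toNat := by
    rw [ge_iff_le, UInt32.le_iff_toNat_le] at h1
    exact h1
  have l2 : c.toNat ≤ 57 := by
    rw [UInt32.le_iff_toNat_le] at h2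
    exact h2
  have : c.toNat = 48 ∨ c.toNat = 49 ∨ c.toNat = 50 ∨ c.toNat = 51 ∨ c.toNat = 52 ∨
      c.toNat = 53 ∨ c.toNat = 54 ∨ c.toNat = 55 ∨ c.toNat = 56 ∨ c.toNat = 57 := by omega
  rcases this with h | h | h | h | h | h | h | h | h | h <;>
    (rw [← Char.ofNat_toNat c, h]; decide)

-- the common one-pass core both programs are reduced to:
-- r = pending run, result = remaining output
def g : List Char → List Char → List Char
  | r, [] => r
  | r, c :: cs =>
    if c ∈ prefixChars ∧ (r.getLast?.getD ' ').isDigit = true then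
      '(' :: (r ++ '*' :: c :: ')' :: g [] cs)
    else if c ∈ runChars then g (r ++ [c]) cs
    else r ++ c :: g [] cs

def onep (l : List Char) : List Char :=
  match l with
  | [] => []
  | c :: cs => g [c] cs

lemma g_wrap (r : List Char) (c : Char) (cs : List Char) (h1 : c ∈ prefixChars)
    (h2 : (r.getLast?.getD ' ').isDigit = true) :
    g r (c :: cs) = '(' :: (r ++ '*' :: c :: ')' :: g [] cs) := by
  simp only [g]; rw [if_pos ⟨h1, h2⟩]

lemma g_run (r : List Char) (c : Char) (cs : List Char) (h2 : c ∈ runChars) :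
    g r (c :: cs) = g (r ++ [c]) cs := by
  simp only [g]
  rw [if_neg (fun hh => run_not_pre c h2 hh.1), if_pos h2]

lemma g_flush (r : List Char) (c : Char) (cs : List Char)
    (h1 : ¬(c ∈ prefixChars ∧ (r.getLast?.getD ' ').isDigit = true)) (h2 : c ∉ runChars) :
    g r (c :: cs) = r ++ c :: g [] cs := by
  simp only [g]; rw [if_neg h1, if_neg h2]

lemma g_accum : ∀ (m : List Char), (∀ c ∈ m, c ∈ runChars) → ∀ r z, g r (m ++ z) = g (r ++ m) z := by
  intro m
  induction m with
  | nil => intro _ r z; simp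
  | cons c m' ih =>
    intro h r z
    rw [List.cons_append, g_run r c _ (h c (by simp))]
    rw [ih (fun d hd => h d (by simp [hd])) (r ++ [c]) z]
    simp

lemma g_star_seg (r m : List Char) (p : Char) (t : List Char)
    (hm : ∀ c ∈ m, c ∈ runChars) (hp : p ∉ runChars) :
    g r (m ++ '*' :: p :: ')' :: t) = r ++ m ++ '*' :: p :: ')' :: g [] t := by
  rw [g_accum m hm r]
  rw [g_flush (r ++ m) '*' _ (fun hh => absurd hh.1 (by decide)) (by decide)]
  rw [g_flush [] p _ (fun hh => absurd hh.2 (by decide)) hp]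
  rw [g_flush [] ')' _ (fun hh => absurd hh.1 (by decide)) (by decide)]
  simp

lemma g_wrap_seg (r m : List Char) (p : Char) (t : List Char)
    (hm : ∀ c ∈ m, c ∈ runChars) (hd : ((r ++ m).getLast?.getD ' ').isDigit = true)
    (hp : p ∈ prefixChars) :
    g r (m ++ p :: t) = '(' :: ((r ++ m) ++ '*' :: p :: ')' :: g [] t) := by
  rw [g_accum m hm r]
  exact g_wrap (r ++ m) p t hp hd

lemma g_paren_seg (m : List Char) (p : Char) (t : List Char)
    (hm : ∀ c ∈ m.tail, c ∈ runChars) (hp : p ∉ runChars) :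
    g ['('] (m ++ '*' :: p :: ')' :: t) = '(' :: m ++ '*' :: p :: ')' :: g [] t := by
  cases m with
  | nil =>
    have := g_star_seg ['('] [] p t (by simp) hp
    simpa using this
  | cons c0 m' =>
    by_cases h0 : c0 ∈ runChars
    · have hall : ∀ c ∈ c0 :: m', c ∈ runChars := by
        intro c hc
        rcases List.mem_cons.mp hc with rfl | hc'
        · exact h0
        · exact hm c hc'
      have := g_star_seg ['('] (c0 :: m') p t hall hp
      simpa using this
    · rw [List.cons_append, g_flush ['('] c0 _ (fun hh => absurd hh.2 (by decide)) h0]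
      rw [g_star_seg [] m' p t hm hp]
      simp

lemma g_flush_prefix : ∀ (a : List Char), a ≠ [] →
    (∀ c, a.getLast? = some c → c ∉ runChars) →
    ∀ r, ∃ out, ∀ v, g r (a ++ v) = out ++ g [] v := by
  intro a
  induction a with
  | nil => intro h; exact absurd rfl h
  | cons c a' ih =>
    intro _ hlast r
    cases a' with
    | nil =>
      have hc : c ∉ runChars := hlast c rfl
      by_cases hw : c ∈ prefixChars ∧ (r.getLast?.getD ' ').isDigit = true
      · exact ⟨'(' :: (r ++ ['*', c, ')']), fun v => by
          rw [List.cons_append, List.nil_append, g_wrap r c v hw.1 hw.2]; simp⟩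
      · exact ⟨r ++ [c], fun v => by
          rw [List.cons_append, List.nil_append, g_flush r c v hw hc]; simp⟩
    | cons b a'' =>
      have hne : (b :: a'') ≠ [] := by simp
      have hlast' : ∀ d, (b :: a'').getLast? = some d → d ∉ runChars := by
        intro d hd; exact hlast d (by rw [List.getLast?_cons_cons]; exact hd)
      by_cases hw : c ∈ prefixChars ∧ (r.getLast?.getD ' ').isDigit = true
      · obtain ⟨out, hout⟩ := ih hne hlast' []
        exact ⟨'(' :: (r ++ '*' :: c :: ')' :: out), fun v => by
          rw [List.cons_append, g_wrap r c _ hw.1 hw.2, hout v]; simp⟩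
      · by_cases hr : c ∈ runChars
        · obtain ⟨out, hout⟩ := ih hne hlast' (r ++ [c])
          exact ⟨out, fun v => by rw [List.cons_append, g_run r c _ hr, hout v]⟩
        · obtain ⟨out, hout⟩ := ih hne hlast' []
          exact ⟨r ++ c :: out, fun v => by
            rw [List.cons_append, g_flush r c _ hw hr, hout v]; simp⟩

-- one A-rewrite does not change the one-pass result
lemma step_onep (a m t : List Char) (p : Char) (hp : p ∈ prefixChars) (hm : m ≠ [])
    (hd : (m.getLast?.getD ' ').isDigit = true)
    (hcase : (a = [] ∧ ∀ c ∈ m.tail, c ∈ runChars) ∨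
      (2 ≤ a.length ∧ (∀ c ∈ m, c ∈ runChars) ∧ (∀ c, a.getLast? = some c → c ∉ runChars))) :
    onep (a ++ '(' :: (m ++ '*' :: p :: ')' :: t)) = onep (a ++ (m ++ p :: t)) := by
  have hpnr : p ∉ runChars := pre_not_run p hp
  rcases hcase with ⟨ha, htail⟩ | ⟨hlen, hall, hlast⟩
  · subst ha
    cases m with
    | nil => exact absurd rfl hm
    | cons c0 m' =>
      have hL : onep ('(' :: ((c0 :: m') ++ '*' :: p :: ')' :: t)) =
          '(' :: (c0 :: m') ++ '*' :: p :: ')' :: g [] t := by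
        show g ['('] ((c0 :: m') ++ '*' :: p :: ')' :: t) = _
        exact g_paren_seg (c0 :: m') p t htail hpnr
      have hR : onep ((c0 :: m') ++ p :: t) =
          '(' :: ((c0 :: m') ++ '*' :: p :: ')' :: g [] t) := by
        show g [c0] (m' ++ p :: t) = _
        have hd' : (([c0] ++ m').getLast?.getD ' ').isDigit = true := by simpa using hd
        have := g_wrap_seg [c0] m' p t htail hd' hp
        simpa using this
      simp only [List.nil_append]
      rw [hL, hR]
      simp
  · cases a with
    | nil => simp at hlen
    | cons c0 a' =>
      have ha' : a' ≠ [] := by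
        intro h; subst h; simp at hlen
      have hlast' : ∀ c, a'.getLast? = some c → c ∉ runChars := by
        intro c hc
        apply hlast
        cases a' with
        | nil => exact absurd rfl ha'
        | cons b l => rw [List.getLast?_cons_cons]; exact hc
      obtain ⟨out, hout⟩ := g_flush_prefix a' ha' hlast' [c0]
      have hallm : ∀ c ∈ m, c ∈ runChars := hall
      have eL : onep ((c0 :: a') ++ '(' :: (m ++ '*' :: p :: ')' :: t)) =
          out ++ '(' :: (m ++ '*' :: p :: ')' :: g [] t) := by
        show g [c0] (a' ++ '(' :: (m ++ '*' :: p :: ')' :: t)) = _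
        rw [hout]
        rw [g_flush [] '(' _ (fun hh => absurd hh.1 (by decide)) (by decide)]
        rw [g_star_seg [] m p t hallm hpnr]
        simp
      have eR : onep ((c0 :: a') ++ (m ++ p :: t)) =
          out ++ '(' :: (m ++ '*' :: p :: ')' :: g [] t) := by
        show g [c0] (a' ++ (m ++ p :: t)) = _
        rw [hout]
        rw [g_wrap_seg [] m p t hallm (by simpa using hd) hp]
        simp
      exact eL.trans eR.symm

-- counting (digit, q) adjacencies
def glue (q : Char) : Option Char → Option Char → Nat
  | some x, some y => if x.isDigit = true ∧ y = q then 1 else 0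
  | _, _ => 0

def cnt (q : Char) : List Char → Nat
  | [] => 0
  | [_] => 0
  | a :: b :: t => (if a.isDigit = true ∧ b = q then 1 else 0) + cnt q (b :: t)

lemma cnt_cons (q a : Char) (l : List Char) :
    cnt q (a :: l) = glue q (some a) l.head? + cnt q l := by
  cases l <;> simp [cnt, glue]

lemma cnt_append (q : Char) : ∀ u v, cnt q (u ++ v) = cnt q u + glue q u.getLast? v.head? + cnt q v := by
  intro u
  induction u with
  | nil => intro v; simp [cnt, glue]
  | cons c u' ih =>
    intro v
    rw [List.cons_append, cnt_cons]
    cases u' with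
    | nil => simp [cnt, glue]
    | cons b u'' =>
      rw [ih v, cnt_cons q c (b :: u'')]
      simp only [List.head?_append, List.head?_cons, Option.some_or, List.getLast?_cons_cons]
      omega

lemma glue_le_one (q : Char) (o1 o2 : Option Char) : glue q o1 o2 ≤ 1 := by
  cases o1 <;> cases o2 <;> simp [glue] <;> split <;> omega

lemma cnt_le_len (q : Char) : ∀ l, cnt q l ≤ l.length := by
  intro l
  induction l with
  | nil => simp [cnt]
  | cons a l' ih =>
    rw [cnt_cons]
    have := glue_le_one q (some a) l'.head?
    simp only [List.length_cons]
    omega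

lemma cnt_zero_of_run (q : Char) (hq : q ∈ prefixChars) :
    ∀ m, (∀ c ∈ m.tail, c ∈ runChars) → cnt q m = 0 := by
  intro m
  induction m with
  | nil => intro _; simp [cnt]
  | cons a m' ih =>
    intro h
    rw [cnt_cons]
    have h2 : cnt q m' = 0 := ih (fun c hc => h c (List.mem_of_mem_tail hc))
    have h3 : glue q (some a) m'.head? = 0 := by
      cases m' with
      | nil => simp [glue]
      | cons b m'' =>
        have hb : b ∈ runChars := h b (by simp)
        have : b ≠ q := by
          intro h; subst h
          exact run_not_pre b hb hq
        simp [glue, this]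
    omega

-- one A-rewrite removes exactly one (digit, p) adjacency and no other (digit, prefix) adjacency
lemma cnt_rewrite (q : Char) (a m t : List Char) (p : Char)
    (hq : q ∈ prefixChars) (hp : p ∈ prefixChars) (hm : m ≠ [])
    (hd : (m.getLast?.getD ' ').isDigit = true)
    (hcase : (a = [] ∧ ∀ c ∈ m.tail, c ∈ runChars) ∨
      (2 ≤ a.length ∧ (∀ c ∈ m, c ∈ runChars) ∧ (∀ c, a.getLast? = some c → c ∉ runChars))) :
    cnt q (a ++ '(' :: (m ++ '*' :: p :: ')' :: t)) + (if q = p then 1 else 0) =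
      cnt q (a ++ (m ++ p :: t)) := by
  have hmt : ∀ c ∈ m.tail, c ∈ runChars := by
    rcases hcase with ⟨_, h⟩ | ⟨_, h, _⟩
    · exact h
    · exact fun c hc => h c (List.mem_of_mem_tail hc)
  have hcm : cnt q m = 0 := cnt_zero_of_run q hq m hmt
  cases m with
  | nil => exact absurd rfl hm
  | cons b m' =>
    have hglue_am : glue q a.getLast? (some b) = 0 := by
      rcases hcase with ⟨rfl, _⟩ | ⟨_, hall, _⟩
      · simp [glue]
      · have hb : b ∈ runChars := hall b (by simp)
        have hbq : b ≠ q := by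
          intro h; subst h; exact run_not_pre b hb hq
        cases a.getLast? <;> simp [glue, hbq]
    have hql : '(' ≠ q := by
      intro h; subst h; exact (by decide : '(' ∉ prefixChars) hq
    have hqs : '*' ≠ q := by
      intro h; subst h; exact (by decide : '*' ∉ prefixChars) hq
    have hqr : ')' ≠ q := by
      intro h; subst h; exact (by decide : ')' ∉ prefixChars) hq
    have hpd : p.isDigit = false := pre_not_digit p hp
    obtain ⟨dlast, hdlast⟩ : ∃ d, (b :: m').getLast? = some d := by
      cases h : (b :: m').getLast? with
      | none => exact absurd h (by simp)
      | some d => exact ⟨d, rfl⟩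
    have hdl : dlast.isDigit = true := by rw [hdlast] at hd; simpa using hd
    have e1 : glue q a.getLast? (some '(') = 0 := by
      cases a.getLast? <;> simp [glue, hql]
    have e2 : glue q (some '(') (some b) = 0 := by
      simp [glue, show ('(').isDigit = false from by decide]
    have e3 : glue q (some dlast) (some '*') = 0 := by simp [glue, hqs]
    have e4 : glue q (some '*') (some p) = 0 := by
      simp [glue, show ('*').isDigit = false from by decide]
    have e5 : glue q (some p) (some ')') = 0 := by simp [glue, hqr]
    have e6 : glue q (some ')') t.head? = 0 := by
      cases t.head? <;> simp [glue, show (')').isDigit = false from by decide]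
    have e7 : glue q (some p) t.head? = 0 := by cases t.head? <;> simp [glue, hpd]
    have e8 : glue q (some dlast) (some p) = if q = p then 1 else 0 := by
      rcases eq_or_ne q p with rfl | hqp
      · simp [glue, hdl]
      · simp [glue, hdl, Ne.symm hqp, hqp]
    -- right-hand side
    rw [cnt_append q a ((b :: m') ++ p :: t), cnt_append q (b :: m') (p :: t), cnt_cons q p t]
    -- left-hand side
    rw [cnt_append q a ('(' :: ((b :: m') ++ '*' :: p :: ')' :: t)),
        cnt_cons q '(' ((b :: m') ++ '*' :: p :: ')' :: t),
        cnt_append q (b :: m') ('*' :: p :: ')' :: t),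
        cnt_cons q '*' (p :: ')' :: t), cnt_cons q p (')' :: t), cnt_cons q ')' t]
    simp only [List.head?_append, List.head?_cons, Option.some_or, hdlast]
    rw [e1, e2, e3, e4, e5, e6, e7, e8, hglue_am, hcm]
    by_cases hqp2 : q = p <;> simp [hqp2] <;> omega

-- "no (digit, prefix) adjacency" and the fixpoint property of the one-pass core
def noM : List Char → Prop
  | [] => True
  | [_] => True
  | a :: b :: t => ¬(a.isDigit = true ∧ b ∈ prefixChars) ∧ noM (b :: t)

lemma noM_of_cnt : ∀ l, (∀ q ∈ prefixChars, cnt q l = 0) → noM l := by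
  intro l
  induction l with
  | nil => intro _; trivial
  | cons a l' ih =>
    intro h
    cases l' with
    | nil => trivial
    | cons b t =>
      refine ⟨?_, ih (fun q hq => ?_)⟩
      · rintro ⟨hd, hbp⟩
        have := h b hbp
        rw [cnt_cons] at this
        simp [glue, hd] at this
      · have := h q hq
        rw [cnt_cons] at this
        omega

lemma noM_tail : ∀ (a : Char) (l : List Char), noM (a :: l) → noM l := by
  intro a l h
  cases l with
  | nil => trivial
  | cons b t => exact h.2

lemma noM_suffix : ∀ u v, noM (u ++ v) → noM v := by
  intro u
  induction u with
  | nil => intro v h; exact h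
  | cons c u' ih => intro v h; exact ih v (noM_tail c _ h)

lemma noM_pair : ∀ (u : List Char) (d c : Char) (v : List Char),
    noM (u ++ d :: c :: v) → ¬(d.isDigit = true ∧ c ∈ prefixChars) := by
  intro u
  induction u with
  | nil => intro d c v h; exact h.1
  | cons e u' ih => intro d c v h; exact ih d c v (noM_tail e _ h)

lemma fixg : ∀ l r, noM (r ++ l) → g r l = r ++ l := by
  intro l
  induction l with
  | nil => intro r _; simp [g]
  | cons c cs ih =>
    intro r h
    by_cases hw : c ∈ prefixChars ∧ (r.getLast?.getD ' ').isDigit = true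
    · exfalso
      obtain ⟨hc, hdig⟩ := hw
      cases hr : r.getLast? with
      | none => rw [hr] at hdig; exact absurd hdig (by decide)
      | some d =>
        rw [hr] at hdig
        simp at hdig
        obtain ⟨u, rfl⟩ := List.getLast?_eq_some_iff.mp hr
        exact noM_pair u d c cs (by simpa using h) ⟨hdig, hc⟩
    · by_cases hrn : c ∈ runChars
      · rw [g_run r c cs hrn, ih (r ++ [c]) (by simpa using h)]
        simp
      · rw [g_flush r c cs hw hrn,
          ih [] (noM_suffix (r ++ [c]) cs (by simpa using h))]
        simp

-- fnd characterization
lemma fndGo_none (p : Char) : ∀ (cs : List Char) (prev : Char) (i : Nat),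
    fndGo p prev cs i = none → cnt p (prev :: cs) = 0 := by
  intro cs
  induction cs with
  | nil => intro prev i _; simp [cnt]
  | cons c cs' ih =>
    intro prev i h
    simp only [fndGo] at h
    by_cases hcond : c = p ∧ prev.isDigit = true
    · rw [if_pos hcond] at h; exact absurd h (by simp)
    · rw [if_neg hcond] at h
      have h2 := ih c (i + 1) h
      have h3 : ¬(prev.isDigit = true ∧ c = p) := fun ⟨x, y⟩ => hcond ⟨y, x⟩
      rw [cnt_cons]
      simp only [List.head?_cons]
      simp [glue, h3, h2]

lemma fnd_none (l : List Char) (p : Char) : fnd l p = none → cnt p l = 0 := by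
  intro h
  cases l with
  | nil => simp [cnt]
  | cons c cs => exact fndGo_none p cs c 1 h

lemma fndGo_some (p : Char) : ∀ (cs : List Char) (prev : Char) (i pos : Nat),
    fndGo p prev cs i = some pos →
    ∃ k, pos = i + k ∧ k < cs.length ∧ cs.getD k ' ' = p ∧
      ((prev :: cs).getD k ' ').isDigit = true := by
  intro cs
  induction cs with
  | nil => intro prev i pos h; exact absurd h (by simp [fndGo])
  | cons c cs' ih =>
    intro prev i pos h
    simp only [fndGo] at h
    by_cases hcond : c = p ∧ prev.isDigit = true
    · rw [if_pos hcond] at h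
      refine ⟨0, by simpa using h.symm, by simp, by simpa using hcond.1, by simpa using hcond.2⟩
    · rw [if_neg hcond] at h
      obtain ⟨k', e, hlt, h1, h2⟩ := ih c (i + 1) pos h
      exact ⟨k' + 1, by omega, by simpa using hlt, by simpa using h1, by simpa using h2⟩

lemma fnd_some (l : List Char) (p : Char) (pos : Nat) : fnd l p = some pos →
    1 ≤ pos ∧ pos < l.length ∧ l.getD pos ' ' = p ∧ (l.getD (pos - 1) ' ').isDigit = true := by
  intro h
  cases l with
  | nil => exact absurd h (by simp [fnd])
  | cons c cs =>
    obtain ⟨k, rfl, hlt, h1, h2⟩ := fndGo_some p cs c 1 _ h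
    refine ⟨by omega, by simp; omega, ?_, ?_⟩
    · show (c :: cs).getD (1 + k) ' ' = p
      rw [show 1 + k = k + 1 from by omega]
      simpa using h1
    · show ((c :: cs).getD (1 + k - 1) ' ').isDigit = true
      rw [show 1 + k - 1 = k from by omega]
      exact h2

-- strt characterization
lemma strtGo_spec (x : List Char) : ∀ i,
    (strtGo x i = 0 ∧ ∀ j, 1 ≤ j → j ≤ i → x.getD j ' ' ∈ runChars) ∨
    (2 ≤ strtGo x i ∧ strtGo x i ≤ i + 1 ∧ x.getD (strtGo x i - 1) ' ' ∉ runChars ∧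
      ∀ j, strtGo x i ≤ j → j ≤ i → x.getD j ' ' ∈ runChars) := by
  intro i
  induction i with
  | zero => exact Or.inl ⟨rfl, fun j h1 h2 => absurd (h1.trans h2) (by omega)⟩
  | succ i ih =>
    by_cases h : x.getD (i + 1) ' ' ∈ runChars
    · have e : strtGo x (i + 1) = strtGo x i := by simp only [strtGo]; rw [if_pos h]
      rw [e]
      rcases ih with ⟨h0, hall⟩ | ⟨h2, hle, hnot, hall⟩
      · refine Or.inl ⟨h0, fun j hj1 hj2 => ?_⟩
        rcases Nat.lt_or_ge j (i + 1) with hj | hj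
        · exact hall j hj1 (by omega)
        · rw [show j = i + 1 from by omega]; exact h
      · refine Or.inr ⟨h2, by omega, hnot, fun j hj1 hj2 => ?_⟩
        rcases Nat.lt_or_ge j (i + 1) with hj | hj
        · exact hall j hj1 (by omega)
        · rw [show j = i + 1 from by omega]; exact h
    · have e : strtGo x (i + 1) = i + 2 := by simp only [strtGo]; rw [if_neg h]
      rw [e]
      exact Or.inr ⟨by omega, by omega, by simpa using h,
        fun j hj1 hj2 => absurd (hj1.trans hj2) (by omega)⟩

-- factorization of the string around one match, with the shape facts the step lemmas need
lemma rewrite_facts (l : List Char) (p : Char) (pos : Nat)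
    (h1 : 1 ≤ pos) (h2 : pos < l.length) (h3 : l.getD pos ' ' = p)
    (h4 : (l.getD (pos - 1) ' ').isDigit = true) :
    ∃ a m t, l = a ++ (m ++ p :: t) ∧
      rw1 l (strt l pos) pos = a ++ '(' :: (m ++ '*' :: p :: ')' :: t) ∧ m ≠ [] ∧
      ((m.getLast?.getD ' ').isDigit = true) ∧
      ((a = [] ∧ ∀ c ∈ m.tail, c ∈ runChars) ∨
        (2 ≤ a.length ∧ (∀ c ∈ m, c ∈ runChars) ∧ (∀ c, a.getLast? = some c → c ∉ runChars))) := by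
  have getDconv : ∀ (j : Nat) (hj : j < l.length), l.getD j ' ' = l[j] := by
    intro j hj
    rw [List.getD_eq_getElem?_getD, List.getElem?_eq_getElem hj, Option.getD_some]
  have hprev_run : l.getD (pos - 1) ' ' ∈ runChars := digit_run _ h4
  have hpm1 : pos - 1 < l.length := by omega
  set s := strt l pos with hs
  have hseq : s = strtGo l (pos - 1) := by rw [hs, strt]
  have hspec := strtGo_spec l (pos - 1)
  have hsle : s ≤ pos - 1 := by
    rcases hspec with ⟨h0, _⟩ | ⟨hge2, hle, hnot, _⟩
    · omega
    · by_contra hgt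
      have : strtGo l (pos - 1) = pos := by omega
      rw [this] at hnot
      exact hnot hprev_run
  have hmlen : ((l.take pos).drop s).length = pos - s := by
    simp only [List.length_drop, List.length_take]
    omega
  have hget : ∀ k (hk : k < pos - s), ((l.take pos).drop s)[k]'(by omega) = l[s + k]'(by omega) := by
    intro k hk
    rw [List.getElem_drop, List.getElem_take]
  refine ⟨l.take s, (l.take pos).drop s, l.drop (pos + 1), ?_, ?_, ?_, ?_, ?_⟩
  · -- l = take s ++ (drop s (take pos) ++ p :: drop (pos+1))
    have e1 : l.take s ++ (l.take pos).drop s = l.take pos := by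
      rw [show l.take s = (l.take pos).take s from by
        rw [List.take_take]; congr 1; omega]
      exact List.take_append_drop s (l.take pos)
    have e2 : l.drop pos = l[pos] :: l.drop (pos + 1) := List.drop_eq_getElem_cons h2
    have e3 : l[pos] = p := by rw [← getDconv pos h2]; exact h3
    calc l = l.take pos ++ l.drop pos := (List.take_append_drop pos l).symm
      _ = (l.take s ++ (l.take pos).drop s) ++ (p :: l.drop (pos + 1)) := by rw [e1, e2, e3]
      _ = l.take s ++ ((l.take pos).drop s ++ p :: l.drop (pos + 1)) := by
          rw [List.append_assoc]
  · -- rw1 unfolds to exactly this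
    rw [rw1, h3]
  · -- m ≠ []
    intro hnil
    rw [hnil] at hmlen
    simp at hmlen
    omega
  · -- last of m is l[pos-1], a digit
    have hidx : pos - s - 1 < ((l.take pos).drop s).length := by omega
    have hlast : ((l.take pos).drop s).getLast? = some (l[pos - 1]'hpm1) := by
      rw [List.getLast?_eq_getElem?, hmlen, List.getElem?_eq_getElem hidx]
      congr 1
      rw [hget (pos - s - 1) (by omega)]
      congr 1
      omega
    rw [hlast, Option.getD_some]
    rw [getDconv (pos - 1) hpm1] at h4
    exact h4
  · -- the shape disjunction
    rcases hspec with ⟨h0, hall⟩ | ⟨hge2, hle, hnot, hall⟩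
    · -- s = 0
      have hs0 : s = 0 := by omega
      left
      refine ⟨by rw [hs0]; simp, ?_⟩
      intro c hc
      obtain ⟨k, hk, hck⟩ := List.mem_iff_getElem.mp hc
      have hk' : k + 1 < pos - s := by
        rw [List.length_tail, hmlen] at hk
        omega
      have hck' : c = l[s + (k + 1)]'(by omega) := by
        rw [← hck, List.getElem_tail, hget (k + 1) hk']
      rw [hck']
      have := hall (s + (k + 1)) (by omega) (by omega)
      rwa [getDconv (s + (k + 1)) (by omega)] at this
    · -- 2 ≤ s
      have hs2 : 2 ≤ s := by omega
      right
      refine ⟨?_, ?_, ?_⟩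
      · simp only [List.length_take]
        omega
      · intro c hc
        obtain ⟨k, hk, hck⟩ := List.mem_iff_getElem.mp hc
        have hk' : k < pos - s := by
          rw [hmlen] at hk
          omega
        have hck' : c = l[s + k]'(by omega) := by rw [← hck, hget k hk']
        rw [hck']
        have := hall (s + k) (by omega) (by omega)
        rwa [getDconv (s + k) (by omega)] at this
      · intro c hc
        have hlt : s - 1 < l.length := by omega
        have htls : (l.take s).length = s := by
          simp only [List.length_take]
          omega
        have htl : (l.take s).getLast? = some (l[s - 1]'hlt) := by
          rw [List.getLast?_eq_getElem?, htls, List.getElem?_eq_getElem (by rw [htls]; omega)]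
          congr 1
          rw [List.getElem_take]
        rw [htl] at hc
        have hc' : c = l[s - 1]'hlt := by
          injection hc with hh
          exact hh.symm
        rw [hc']
        have hnot' : l.getD (s - 1) ' ' ∉ runChars := by
          rw [hseq]
          exact hnot
        rwa [getDconv (s - 1) hlt] at hnot'

lemma whileA_spec (p : Char) (hp : p ∈ prefixChars) : ∀ fuel l, cnt p l < fuel →
    onep (whileA p fuel l) = onep l ∧ cnt p (whileA p fuel l) = 0 ∧
    (∀ q ∈ prefixChars, q ≠ p → cnt q (whileA p fuel l) = cnt q l) := by
  intro fuel
  induction fuel with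
  | zero => intro l h; omega
  | succ fuel ih =>
    intro l h
    cases hf : fnd l p with
    | none =>
      have e : whileA p (fuel + 1) l = l := by simp [whileA, hf]
      rw [e]
      exact ⟨rfl, fnd_none l p hf, fun _ _ _ => rfl⟩
    | some pos =>
      obtain ⟨hpos1, hpos2, hgetp, hdig⟩ := fnd_some l p pos hf
      obtain ⟨a, m, t, hl, hrw, hm, hmd, hcase⟩ := rewrite_facts l p pos hpos1 hpos2 hgetp hdig
      have hstep : onep (rw1 l (strt l pos) pos) = onep l := by
        rw [hrw]
        conv_rhs => rw [hl]
        exact step_onep a m t p hp hm hmd hcase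
      have hcnt : ∀ q ∈ prefixChars,
          cnt q (rw1 l (strt l pos) pos) + (if q = p then 1 else 0) = cnt q l := by
        intro q hq
        rw [hrw]
        conv_rhs => rw [hl]
        exact cnt_rewrite q a m t p hq hp hm hmd hcase
      have hplt : cnt p (rw1 l (strt l pos) pos) < fuel := by
        have := hcnt p hp
        simp at this
        omega
      obtain ⟨e1, e2, e3⟩ := ih (rw1 l (strt l pos) pos) hplt
      have e : whileA p (fuel + 1) l = whileA p fuel (rw1 l (strt l pos) pos) := by
        simp [whileA, hf]
      rw [e]
      refine ⟨e1.trans hstep, e2, fun q hq hqp => ?_⟩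
      have := hcnt q hq
      rw [if_neg hqp] at this
      rw [e3 q hq hqp]
      omega

lemma fold_spec : ∀ (ps : List Char) l, (∀ p ∈ ps, p ∈ prefixChars) →
    onep (ps.foldl (fun s p => whileA p (s.length + 1) s) l) = onep l ∧
    (∀ q ∈ prefixChars, cnt q (ps.foldl (fun s p => whileA p (s.length + 1) s) l) =
      if q ∈ ps then 0 else cnt q l) := by
  intro ps
  induction ps with
  | nil => intro l _; exact ⟨rfl, fun q _ => by simp⟩
  | cons p ps' ih =>
    intro l hmem
    have hp : p ∈ prefixChars := hmem p (by simp)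
    obtain ⟨e1, e2, e3⟩ := whileA_spec p hp (l.length + 1) l (by
      have := cnt_le_len p l; omega)
    obtain ⟨f1, f2⟩ := ih (whileA p (l.length + 1) l) (fun q hq => hmem q (by simp [hq]))
    refine ⟨?_, ?_⟩
    · simp only [List.foldl_cons]
      exact f1.trans e1
    · intro q hq
      simp only [List.foldl_cons]
      rw [f2 q hq]
      by_cases hqs : q ∈ ps'
      · simp [hqs]
      · by_cases hqp : q = p
        · subst hqp
          simp [hqs, e2]
        · simp [hqs, hqp, e3 q hq hqp]

lemma parse_eq_onep (l : List Char) :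
    prefixChars.foldl (fun s p => whileA p (s.length + 1) s) l = onep l := by
  obtain ⟨e1, e2⟩ := fold_spec prefixChars l (fun p hp => hp)
  have hnm : noM (prefixChars.foldl (fun s p => whileA p (s.length + 1) s) l) :=
    noM_of_cnt _ (fun q hq => by rw [e2 q hq]; simp [hq])
  have hfix : ∀ y, noM y → onep y = y := by
    intro y hy
    cases y with
    | nil => rfl
    | cons c cs =>
      show g [c] cs = c :: cs
      have := fixg cs [c] (by simpa using hy)
      simpa using this
  calc prefixChars.foldl (fun s p => whileA p (s.length + 1) s) l
      = onep (prefixChars.foldl (fun s p => whileA p (s.length + 1) s) l) := (hfix _ hnm).symm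
    _ = onep l := e1

-- B's fold computes the one-pass core with empty initial run
lemma alt_fold : ∀ (l : List Char) (out run : List Char),
    ((l.foldl altStep (out, run)).1 ++ (l.foldl altStep (out, run)).2) = out ++ g run l := by
  intro l
  induction l with
  | nil => intro out run; simp [g]
  | cons c cs ih =>
    intro out run
    simp only [List.foldl_cons]
    by_cases hw : c ∈ prefixChars ∧ (run.getLast?.getD ' ').isDigit = true
    · have hrne : run ≠ [] := by
        intro h
        rw [h] at hw
        exact absurd hw.2 (by decide)
      have e : altStep (out, run) c = (out ++ '(' :: (run ++ ['*', c, ')']), []) := by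
        simp [altStep, hrne, hw.1, hw.2]
      rw [e, ih, g_wrap run c cs hw.1 hw.2]
      simp
    · have hno : ¬(run ≠ [] ∧ c ∈ prefixChars ∧ (run.getLast?.getD ' ').isDigit = true) :=
        fun ⟨_, hb, hc⟩ => hw ⟨hb, hc⟩
      by_cases hr : c ∈ runChars
      · have e : altStep (out, run) c = (out, run ++ [c]) := by
          simp only [altStep, if_neg hno, if_pos hr]
        rw [e, ih, g_run run c cs hr]
      · have e : altStep (out, run) c = (out ++ (run ++ [c]), []) := by
          simp only [altStep, if_neg hno, if_neg hr]
        rw [e, ih, g_flush run c cs hw hr]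
        simp

lemma parse_alt_eq (x : String) : parse_alt x = String.ofList (g [] x.toList) := by
  unfold parse_alt
  rw [alt_fold x.toList [] []]
  simp

lemma dropWhile_head_not_run : ∀ (l : List Char) (c : Char) (cs : List Char),
    l.dropWhile isRunB = c :: cs → c ∉ runChars := by
  intro l
  induction l with
  | nil => intro c cs h; exact absurd h (by simp)
  | cons a l' ih =>
    intro c cs h
    by_cases ha : isRunB a
    · rw [List.dropWhile_cons_of_pos ha] at h
      exact ih c cs h
    · rw [List.dropWhile_cons_of_neg ha] at h
      injection h with h1 _
      subst h1
      simpa [isRunB] using ha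

-- outside D, quirk-initialised and plain one-pass agree
lemma onep_eq_g0 (l : List Char)
    (hnd : ¬(l ≠ [] ∧ l.headD ' ' ∉ runChars ∧ l.headD ' ' ≠ '(' ∧
      (l.tail.takeWhile isRunB) ≠ [] ∧
      (((l.tail.takeWhile isRunB).getLast?.getD ' ').isDigit = true) ∧
      ((l.tail.dropWhile isRunB).headD ' ') ∈ prefixChars)) :
    onep l = g [] l := by
  cases l with
  | nil => rfl
  | cons c0 cs =>
    by_cases h0 : c0 ∈ runChars
    · rw [g_run [] c0 cs h0]
      rfl
    · simp only [List.tail_cons, List.headD_cons] at hnd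
      have hcond : ∀ (b : Char) (m' rest : List Char) (d : Char),
          cs.takeWhile isRunB = b :: m' → cs.dropWhile isRunB = d :: rest →
          ((b :: m').getLast?.getD ' ').isDigit = true → d ∈ prefixChars → c0 = '(' := by
        intro b m' rest d hta hdr hdg hdp
        by_contra hne
        exact hnd ⟨by simp, h0, hne, by rw [hta]; simp, by rw [hta]; exact hdg,
          by rw [hdr]; simpa using hdp⟩
      have e0 : g [] (c0 :: cs) = c0 :: g [] cs := by
        rw [g_flush [] c0 cs (fun hh => absurd hh.2 (by decide)) h0]
        rfl
      rw [e0]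
      show g [c0] cs = c0 :: g [] cs
      have hmrun : ∀ c ∈ cs.takeWhile isRunB, c ∈ runChars := by
        intro c hc
        have := List.mem_takeWhile_imp hc
        simpa [isRunB] using this
      conv_lhs => rw [← List.takeWhile_append_dropWhile (p := isRunB) (l := cs)]
      conv_rhs => rw [← List.takeWhile_append_dropWhile (p := isRunB) (l := cs)]
      rw [g_accum _ hmrun [c0], g_accum _ hmrun []]
      simp only [List.nil_append]
      cases hdw : cs.dropWhile isRunB with
      | nil => simp [g]
      | cons d rest =>
        have hdnr : d ∉ runChars := dropWhile_head_not_run cs d rest hdw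
        cases htw : cs.takeWhile isRunB with
        | nil =>
          have hA : ¬(d ∈ prefixChars ∧ (([c0] : List Char).getLast?.getD ' ').isDigit = true) := by
            rintro ⟨_, hdg⟩
            simp only [List.getLast?_singleton, Option.getD_some] at hdg
            exact h0 (digit_run c0 hdg)
          have hB : ¬(d ∈ prefixChars ∧ (([] : List Char).getLast?.getD ' ').isDigit = true) :=
            fun hh => absurd hh.2 (by decide)
          simp only [List.append_nil]
          rw [g_flush [c0] d rest hA hdnr, g_flush [] d rest hB hdnr]
          simp
        | cons b m' =>
          by_cases hwrap : d ∈ prefixChars ∧ ((b :: m').getLast?.getD ' ').isDigit = true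
          · have hc0 : c0 = '(' := hcond b m' rest d htw hdw hwrap.2 hwrap.1
            subst hc0
            have hlast2 : (('(' :: b :: m').getLast?.getD ' ').isDigit = true := by
              rw [List.getLast?_cons_cons]
              exact hwrap.2
            rw [show ['('] ++ b :: m' = '(' :: b :: m' from rfl]
            rw [g_wrap ('(' :: b :: m') d rest hwrap.1 hlast2,
              g_wrap (b :: m') d rest hwrap.1 hwrap.2]
            simp
          · have hA : ¬(d ∈ prefixChars ∧ ((c0 :: b :: m').getLast?.getD ' ').isDigit = true) := by
              rintro ⟨hd1, hd2⟩
              rw [List.getLast?_cons_cons] at hd2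
              exact hwrap ⟨hd1, hd2⟩
            rw [show [c0] ++ b :: m' = c0 :: b :: m' from rfl]
            rw [g_flush (c0 :: b :: m') d rest hA hdnr, g_flush (b :: m') d rest hwrap hdnr]
            simp

lemma parse_eq_onep_str (x : String) : parse x = String.ofList (onep x.toList) := by
  unfold parse
  rw [parse_eq_onep]

-- ===== VERDICT (by name: the statement is the Claim_ definition above) =====
theorem parse_spec : Claim_unchanged_parse := by
  intro x _ hD
  unfold D_parse at hD
  rw [parse_eq_onep_str, parse_alt_eq]
  exact congrArg String.ofList (onep_eq_g0 x.toList hD)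

theorem parse_changed : Claim_changed_parse := by
  unfold Claim_changed_parse
  decide

theorem parse_tight : Claim_exact_parse := by
  intro x _ hD hEq
  obtain ⟨hne, h0, hpar, hmne, hdig, hdpre⟩ := hD
  rw [parse_eq_onep_str, parse_alt_eq] at hEq
  have hlists : onep x.toList = g [] x.toList := by
    have := congrArg String.toList hEq
    rwa [String.toList_ofList, String.toList_ofList] at this
  cases hl : x.toList with
  | nil => rw [hl] at hne; exact hne rfl
  | cons c0 cs =>
    rw [hl] at hlists h0 hpar hmne hdig hdpre
    simp only [List.headD_cons, List.tail_cons] at h0 hpar hmne hdig hdpre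
    have hmrun : ∀ c ∈ cs.takeWhile isRunB, c ∈ runChars := by
      intro c hc
      have := List.mem_takeWhile_imp hc
      simpa [isRunB] using this
    have e0 : g [] (c0 :: cs) = c0 :: g [] cs := by
      rw [g_flush [] c0 cs (fun hh => absurd hh.2 (by decide)) h0]
      rfl
    rw [show onep (c0 :: cs) = g [c0] cs from rfl, e0] at hlists
    rw [← List.takeWhile_append_dropWhile (p := isRunB) (l := cs)] at hlists
    rw [g_accum _ hmrun [c0], g_accum _ hmrun []] at hlists
    simp only [List.nil_append] at hlists
    cases htw : cs.takeWhile isRunB with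
    | nil => rw [htw] at hmne; exact hmne rfl
    | cons b m' =>
      rw [htw] at hlists hdig
      cases hdw : cs.dropWhile isRunB with
      | nil => rw [hdw] at hdpre; exact absurd hdpre (by decide)
      | cons d rest =>
        rw [hdw] at hlists hdpre
        simp only [List.headD_cons] at hdpre
        have hdig2 : ((c0 :: b :: m').getLast?.getD ' ').isDigit = true := by
          rw [List.getLast?_cons_cons]
          exact hdig
        rw [show [c0] ++ b :: m' = c0 :: b :: m' from rfl] at hlists
        rw [g_wrap (c0 :: b :: m') d rest hdpre hdig2,
          g_wrap (b :: m') d rest hdpre hdig] at hlists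
        injection hlists with hh _
        exact hpar hh.symm
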